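-- pv_equiv track=rewrite | github.com/qcuincy/early-gesture-recognition | ultraleap_demo/state_encoding.py | get_state_counts_subset
-- ===== SOURCE A (Python) =====
-- def get_state_counts_subset(dhg, states_dict):
--     state_counts = {}
--     for gesture_num in states_dict:
--         for finger_num in states_dict[gesture_num]:
--             for subject_num in states_dict[gesture_num][finger_num]:
--                 for essai_num in states_dict[gesture_num][finger_num][subject_num]:
--                     states = states_dict[gesture_num][finger_num][subject_num][essai_num]
--                     for state in states:
--                         if state in state_counts:
--                             state_counts[state] += 1
--                         else:
--                             state_counts[state] = 1
--
--     # sort by value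
--     state_counts = {k: v for k, v in sorted(state_counts.items(), key=lambda item: item[1], reverse=True)}
--     return state_counts
-- ===== SOURCE B (Python) =====
-- from collections import Counter
--
--
-- def get_state_counts_subset(dhg, states_dict):
--     def flatten(node, out):
--         if isinstance(node, dict):
--             for child in node.values():
--                 flatten(child, out)
--         else:
--             out.extend(node)
--
--     states = []
--     flatten(states_dict, states)
--     counts = Counter(states)
--     return dict(sorted(counts.items(), key=lambda item: item[1], reverse=True))
-- ===== Notes on version B (the rewrite author's own statement) =====
-- stated objective: simpler
-- what changed: Replaces the four explicit nested counting loops with a recursive generator that flattens the nested dict and a single collections.Counter pass, followed by the same descending sort.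
import Mathlib
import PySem

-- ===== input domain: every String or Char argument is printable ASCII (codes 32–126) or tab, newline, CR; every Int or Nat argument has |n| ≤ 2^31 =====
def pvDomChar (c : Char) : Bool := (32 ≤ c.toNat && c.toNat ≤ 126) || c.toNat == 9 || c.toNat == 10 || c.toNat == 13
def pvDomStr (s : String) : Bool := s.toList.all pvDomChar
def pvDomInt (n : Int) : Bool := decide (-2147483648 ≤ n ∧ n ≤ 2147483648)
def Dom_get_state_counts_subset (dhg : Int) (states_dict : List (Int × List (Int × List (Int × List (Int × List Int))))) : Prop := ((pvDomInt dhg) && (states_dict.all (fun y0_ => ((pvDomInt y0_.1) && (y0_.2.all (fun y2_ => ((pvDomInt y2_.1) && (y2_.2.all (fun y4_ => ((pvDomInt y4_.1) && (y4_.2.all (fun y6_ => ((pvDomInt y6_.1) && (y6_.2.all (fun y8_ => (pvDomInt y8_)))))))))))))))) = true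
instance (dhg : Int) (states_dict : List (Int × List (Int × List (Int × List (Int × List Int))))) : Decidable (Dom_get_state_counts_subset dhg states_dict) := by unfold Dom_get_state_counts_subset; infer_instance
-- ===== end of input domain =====

-- B replaces A's four explicit nested counting loops by a flatten-then-Counter pass (simpler decomposition, same cost); the final descending sort is shared.

-- ===== PORT A =====
def get_state_counts_subset (dhg : Int) (states_dict : List (Int × List (Int × List (Int × List (Int × List Int))))) : List (Int × Int) :=
  let state_counts : PySem.Dict Int Int :=
    states_dict.foldl (fun sc g =>
      g.2.foldl (fun sc f =>
        f.2.foldl (fun sc s =>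
          s.2.foldl (fun sc e =>
            e.2.foldl (fun sc state =>
              if sc.contains state then sc.modify state 0 (· + 1) else sc.insert state 1)
              sc) sc) sc) sc) PySem.Dict.empty
  (PySem.Dict.ofList (PySem.List.sorted state_counts.items (fun item => item.2) true)).items

-- ===== PORT B =====
def get_state_counts_subset_alt (dhg : Int) (states_dict : List (Int × List (Int × List (Int × List (Int × List Int))))) : List (Int × Int) :=
  let states : List Int :=
    states_dict.flatMap (fun g => g.2.flatMap (fun f => f.2.flatMap (fun s => s.2.flatMap (fun e => e.2))))
  let counts : PySem.Dict Int Int := PySem.Dict.counter states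
  (PySem.Dict.ofList (PySem.List.sorted counts.items (fun item => item.2) true)).items

-- ===== PRECONDITION & SPEC =====
def Spec_get_state_counts_subset (dhg : Int) (states_dict : List (Int × List (Int × List (Int × List (Int × List Int))))) (out : List (Int × Int)) : Prop := out = get_state_counts_subset_alt dhg states_dict
instance (dhg : Int) (states_dict : List (Int × List (Int × List (Int × List (Int × List Int))))) (out : List (Int × Int)) : Decidable (Spec_get_state_counts_subset dhg states_dict out) := by unfold Spec_get_state_counts_subset; infer_instance

-- ===== CLAIM (what is proved, stated in full; the proofs are below) =====
def Claim_equal_get_state_counts_subset : Prop := ∀ (dhg : Int) (states_dict : List (Int × List (Int × List (Int × List (Int × List Int))))), Dom_get_state_counts_subset dhg states_dict → Spec_get_state_counts_subset dhg states_dict (get_state_counts_subset dhg states_dict)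

-- ===== LEMMAS AND PROOFS =====

-- A's guarded counting step (if present: += 1, else: = 1) is exactly the Counter step.
theorem step_eq (sc : PySem.Dict Int Int) (state : Int) :
    (if sc.contains state then sc.modify state 0 (· + 1) else sc.insert state 1)
      = sc.modify state 0 (· + 1) := by
  by_cases h : sc.contains state = true
  · simp [h]
  · simp only [Bool.not_eq_true] at h
    simp [h, PySem.Dict.modify, PySem.Dict.getD_of_not_contains (h := h)]

-- A's nested loops compute Counter of the flattened state list.
theorem nested_eq_counter (states_dict : List (Int × List (Int × List (Int × List (Int × List Int))))) :
    states_dict.foldl (fun sc g =>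
      g.2.foldl (fun sc f =>
        f.2.foldl (fun sc s =>
          s.2.foldl (fun sc e =>
            e.2.foldl (fun sc state =>
              if sc.contains state then sc.modify state 0 (· + 1) else sc.insert state 1)
              sc) sc) sc) sc) PySem.Dict.empty
    = PySem.Dict.counter
        (states_dict.flatMap (fun g => g.2.flatMap (fun f => f.2.flatMap (fun s => s.2.flatMap (fun e => e.2))))) := by
  rw [PySem.Dict.counter_eq_foldl]
  simp only [List.foldl_flatMap]
  simp only [step_eq]

-- ===== VERDICT (by name: the statement is the Claim_ definition above) =====
theorem get_state_counts_subset_spec : Claim_equal_get_state_counts_subset := by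
  intro dhg states_dict _
  unfold Spec_get_state_counts_subset get_state_counts_subset get_state_counts_subset_alt
  rw [nested_eq_counter]
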